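-- pv_equiv track=rewrite | github.com/F1scherman/AdventOfCode2023 | helper.py | extract_int_at_location
-- ===== SOURCE A (Python) =====
-- def extract_int_at_location(string: str, location:int):
--     """This extract an integer located at a specific location in a string"""
--     if not string[location].isdigit():
--         raise Exception
--
--     i = location - 1
--     while i >= 0:
--         if string[i].isdigit():
--             i -= 1
--         else:
--             break
--     left_coord = i + 1
--
--     i = location + 1
--     while i < len(string):
--         if string[i].isdigit():
--             i += 1
--         else:
--             break
--     right_coord = i - 1
--
--     return int(string[left_coord:right_coord + 1])
-- ===== SOURCE B (Python) =====
-- def _digit_runs(string):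
--     """Tokenize the whole string into its maximal digit runs as (start, run) pairs."""
--     runs = []
--     i = 0
--     n = len(string)
--     while i < n:
--         if string[i].isdigit():
--             j = i
--             while j < n and string[j].isdigit():
--                 j += 1
--             runs.append((i, string[i:j]))
--             i = j
--         else:
--             i += 1
--     return runs
--
--
-- def extract_int_at_location(string: str, location: int):
--     """This extract an integer located at a specific location in a string"""
--     if not (0 <= location < len(string) and string[location].isdigit()):
--         raise Exception
--     for start, run in _digit_runs(string):
--         if start <= location < start + len(run):
--             return int(run)
-- ===== Notes on version B (the rewrite author's own statement) =====
-- stated objective: alternative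
-- what changed: B tokenizes the whole string into maximal digit runs in one left-to-right pass and returns the int of the run containing the position, instead of A's two outward expansion scans from the position.
-- outside the precondition, e.g. on extract_int_at_location('123', -2): A returns 23, B raises Exception; on extract_int_at_location('123', -3): A returns 123, B raises Exception
import Mathlib
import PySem

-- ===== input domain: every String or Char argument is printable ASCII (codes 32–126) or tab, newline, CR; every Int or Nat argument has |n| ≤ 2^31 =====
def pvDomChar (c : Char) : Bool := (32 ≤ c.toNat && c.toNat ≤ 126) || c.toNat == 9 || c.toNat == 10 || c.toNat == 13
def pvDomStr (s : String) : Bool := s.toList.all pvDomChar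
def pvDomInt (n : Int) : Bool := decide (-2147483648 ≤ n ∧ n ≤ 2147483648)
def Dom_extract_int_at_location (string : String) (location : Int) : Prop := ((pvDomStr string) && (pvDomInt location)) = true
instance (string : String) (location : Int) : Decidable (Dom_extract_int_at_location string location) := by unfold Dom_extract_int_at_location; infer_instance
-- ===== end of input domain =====

-- B replaces A's two outward expansion scans from the position by a single whole-string
-- tokenization into maximal digit runs plus selection of the run containing the position
-- (objective: alternative; return value only — neither version mutates its arguments).

-- ===== PORT A =====
-- A's first while loop: i goes down from location-1 while i >= 0 and string[i] is a digit
def pvLeftScan (cs : List Char) (i : Int) : Int :=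
  if h : 0 ≤ i then
    if ((PySem.List.pyGet? cs i).map PySem.Chars.isdigit).getD false then
      pvLeftScan cs (i - 1)
    else i
  else i
termination_by (i + 1).toNat
decreasing_by omega

-- A's second while loop: i goes up from location+1 while i < len(string) and string[i] is a digit
def pvRightScan (cs : List Char) (i : Int) : Int :=
  if h : i < (cs.length : Int) then
    if ((PySem.List.pyGet? cs i).map PySem.Chars.isdigit).getD false then
      pvRightScan cs (i + 1)
    else i
  else i
termination_by ((cs.length : Int) - i).toNat
decreasing_by omega

def extract_int_at_location (string : String) (location : Int) : Int :=
  let cs := string.toList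
  match PySem.List.pyGet? cs location with
  | none => 0          -- Python: IndexError (excluded by Pre_)
  | some c =>
    if ¬ PySem.Chars.isdigit c then 0   -- Python: raise Exception (excluded by Pre_)
    else
      let left_coord := pvLeftScan cs (location - 1) + 1
      let right_coord := pvRightScan cs (location + 1) - 1
      (PySem.Int.ofChars? (PySem.List.slice cs (some left_coord) (some (right_coord + 1)))).getD 0

-- ===== PORT B =====
-- Source B's _digit_runs: one left-to-right pass over the whole string; the inner while loop
-- advancing j over the digits is the takeWhile/dropWhile pair (the same forward scan).
def pvDigitRuns : List Char → Nat → List (Nat × List Char)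
  | [], _ => []
  | c :: rest, i =>
    if PySem.Chars.isdigit c then
      let run := (c :: rest).takeWhile PySem.Chars.isdigit
      (i, run) :: pvDigitRuns ((c :: rest).dropWhile PySem.Chars.isdigit) (i + run.length)
    else
      pvDigitRuns rest (i + 1)
termination_by cs _ => cs.length
decreasing_by
  · simp only [List.dropWhile_cons_of_pos ‹_›]
    exact Nat.lt_succ_of_le (List.length_dropWhile_le _ _)
  · simp

def extract_int_at_location_alt (string : String) (location : Int) : Int :=
  let cs := string.toList
  if 0 ≤ location ∧ location < (cs.length : Int) ∧
      ((PySem.List.pyGet? cs location).map PySem.Chars.isdigit).getD false = true then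
    match (pvDigitRuns cs 0).find?
        (fun sr => decide ((sr.1 : Int) ≤ location ∧ location < (sr.1 : Int) + (sr.2.length : Int))) with
    | some (_, run) => (PySem.Int.ofChars? run).getD 0
    | none => 0      -- unreachable under the guard
  else 0             -- Python: raise Exception (excluded by Pre_)

-- ===== PRECONDITION & SPEC =====
-- Pre_ excludes (a) out-of-range locations and locations holding a non-digit character, where A
-- raises (IndexError / Exception), and (b) negative locations: there A mixes the negative left
-- bound with a forward scan that restarts at index 0, returning accidental values such as 23 for
-- ('123', -2) or raising ValueError, while B's natural bounds check rejects them with an Exception.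
def Pre_extract_int_at_location (string : String) (location : Int) : Prop :=
  0 ≤ location ∧ location < (string.toList.length : Int) ∧
    PySem.Chars.isdigit (string.toList.getD location.toNat ' ') = true
instance (string : String) (location : Int) : Decidable (Pre_extract_int_at_location string location) := by
  unfold Pre_extract_int_at_location; infer_instance

def pvWitness_extract_int_at_location : String × Int := ("ab12c", 3)

def Spec_extract_int_at_location (string : String) (location : Int) (out : Int) : Prop := out = extract_int_at_location_alt string location
instance (string : String) (location : Int) (out : Int) : Decidable (Spec_extract_int_at_location string location out) := by unfold Spec_extract_int_at_location; infer_instance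

-- ===== CLAIM (what is proved, stated in full; the proofs are below) =====
def Claim_equal_extract_int_at_location : Prop := ∀ (string : String) (location : Int), Dom_extract_int_at_location string location → Pre_extract_int_at_location string location → Spec_extract_int_at_location string location (extract_int_at_location string location)

-- ===== LEMMAS AND PROOFS =====

def pvSfx (cs : List Char) (n : Nat) : Nat :=
  (((cs.take n).reverse).takeWhile PySem.Chars.isdigit).length

lemma pvSfx_succ (cs : List Char) (n : Nat) (h : n < cs.length) :
    pvSfx cs (n+1) = if PySem.Chars.isdigit cs[n] then pvSfx cs n + 1 else 0 := by
  unfold pvSfx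
  rw [List.take_succ_eq_append_getElem h, List.reverse_append]
  simp [List.takeWhile_cons]
  split <;> simp

lemma pvLeftScan_eq (cs : List Char) (n : Nat) (hn : n ≤ cs.length) :
    pvLeftScan cs ((n : Int) - 1) = (n : Int) - (pvSfx cs n : Int) - 1 := by
  induction n with
  | zero => rw [pvLeftScan]; simp [pvSfx]
  | succ n ih =>
    have hlt : n < cs.length := hn
    rw [pvLeftScan]
    have h0 : (0:Int) ≤ ((n+1 : Nat) : Int) - 1 := by push_cast; omega
    rw [dif_pos h0]
    have hcast : ((n+1:Nat) : Int) - 1 = (n : Int) := by push_cast; omega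
    have hget : PySem.List.pyGet? cs (((n+1:Nat) : Int) - 1) = some cs[n] := by
      rw [hcast, PySem.List.pyGet?_natCast]; simp [hlt]
    rw [hget, pvSfx_succ cs n hlt]
    by_cases hd : PySem.Chars.isdigit cs[n]
    · simp only [hd, Option.map_some, Option.getD_some, if_true]
      have hc2 : ((n+1:Nat) : Int) - 1 - 1 = (n : Int) - 1 := by push_cast; omega
      rw [hc2, ih (le_of_lt hlt)]
      push_cast; omega
    · simp only [hd, Option.map_some, Option.getD_some, Bool.false_eq_true, if_false]
      push_cast; omega


lemma pvRightScan_eq (cs : List Char) (m : Nat) :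
    pvRightScan cs (m : Int) = (m : Int) + (((cs.drop m).takeWhile PySem.Chars.isdigit).length : Int) := by
  induction h : cs.length - m generalizing m with
  | zero =>
    have hge : cs.length ≤ m := by omega
    rw [pvRightScan, dif_neg (by exact_mod_cast Nat.not_lt.mpr hge)]
    rw [List.drop_eq_nil_of_le hge]
    simp
  | succ k ih =>
    have hlt : m < cs.length := by omega
    rw [pvRightScan, dif_pos (by exact_mod_cast hlt)]
    rw [PySem.List.pyGet?_natCast]
    have hsome : cs[m]? = some cs[m] := by simp [hlt]
    rw [hsome]
    rw [List.drop_eq_getElem_cons hlt, List.takeWhile_cons]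
    by_cases hd : PySem.Chars.isdigit cs[m]
    · simp only [hd, Option.map_some, Option.getD_some, if_true]
      have hc : (m : Int) + 1 = ((m+1 : Nat) : Int) := by push_cast; omega
      rw [hc, ih (m+1) (by omega)]
      simp only [List.length_cons]
      push_cast; omega
    · simp only [hd, Option.map_some, Option.getD_some, Bool.false_eq_true, if_false]
      simp

def pvRun (cs : List Char) (n : Nat) : List Char :=
  (((cs.take n).reverse).takeWhile PySem.Chars.isdigit).reverse
    ++ (cs.drop n).takeWhile PySem.Chars.isdigit

lemma pvSuffix_takeWhile (p : Char → Bool) (xs : List Char) :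
    (xs.reverse.takeWhile p).reverse = xs.drop (xs.length - (xs.reverse.takeWhile p).length) := by
  set t := xs.reverse.takeWhile p with ht
  set d := xs.reverse.dropWhile p with hd
  have hx : xs = d.reverse ++ t.reverse := by
    rw [ht, hd, ← List.reverse_append, List.takeWhile_append_dropWhile, List.reverse_reverse]
  rw [hx]
  have hlen : (d.reverse ++ t.reverse).length - t.length = d.reverse.length := by
    simp [List.length_append]
  rw [hlen, List.drop_left]

lemma pvTakeWhile_eq_take (p' : α → Bool) (l : List α) :
    l.takeWhile p' = l.take (l.takeWhile p').length :=
  List.prefix_iff_eq_take.mp (List.takeWhile_prefix p')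

lemma pvSfx_le (cs : List Char) (n : Nat) (_hn : n ≤ cs.length) : pvSfx cs n ≤ n := by
  have h := (List.takeWhile_prefix (l := (cs.take n).reverse) PySem.Chars.isdigit).length_le
  simp [pvSfx] at *
  omega

lemma pvRun_drop_cons (cs : List Char) (n : Nat) (hn : n < cs.length)
    (hd : PySem.Chars.isdigit cs[n] = true) :
    (cs.drop n).takeWhile PySem.Chars.isdigit
      = cs[n] :: (cs.drop (n+1)).takeWhile PySem.Chars.isdigit := by
  rw [List.drop_eq_getElem_cons hn, List.takeWhile_cons, hd]
  simp

lemma pvA_slice_eq_run (cs : List Char) (n : Nat) (hn : n < cs.length)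
    (hd : PySem.Chars.isdigit cs[n] = true) :
    PySem.List.slice cs (some ((n : Int) - (pvSfx cs n : Int)))
      (some ((n : Int) + 1 + (((cs.drop (n+1)).takeWhile PySem.Chars.isdigit).length : Int)))
      = pvRun cs n := by
  have hsle : pvSfx cs n ≤ n := pvSfx_le cs n (le_of_lt hn)
  set sfx := pvSfx cs n with hsfx
  set pfx := ((cs.drop (n+1)).takeWhile PySem.Chars.isdigit).length with hpfx
  have hcast1 : ((n : Int) - (sfx : Int)) = ((n - sfx : Nat) : Int) := by push_cast; omega
  have hcast2 : ((n : Int) + 1 + (pfx : Int)) = ((n + 1 + pfx : Nat) : Int) := by push_cast; ring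
  rw [hcast1, hcast2, PySem.List.slice_natCast]
  have harith : n + 1 + pfx - (n - sfx) = sfx + (1 + pfx) := by omega
  rw [harith]
  have hlen : (cs.take n).length = n := List.length_take_of_le (le_of_lt hn)
  have hdrop : cs.drop (n - sfx) =
      (((cs.take n).reverse).takeWhile PySem.Chars.isdigit).reverse ++ cs.drop n := by
    have hsuf := pvSuffix_takeWhile PySem.Chars.isdigit (cs.take n)
    rw [hlen] at hsuf
    have hstep : cs.drop (n - sfx)
        = (cs.take n).drop (n - sfx) ++ (cs.drop n).drop (n - sfx - (cs.take n).length) := by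
      conv_lhs => rw [← List.take_append_drop n cs, List.drop_append]
    rw [hstep, hlen, Nat.sub_eq_zero_of_le (Nat.sub_le n sfx), List.drop_zero]
    exact congrArg (fun l => l ++ cs.drop n) hsuf.symm
  rw [hdrop, List.take_append]
  have htlen : (((cs.take n).reverse).takeWhile PySem.Chars.isdigit).reverse.length = sfx := by
    simp [hsfx, pvSfx]
  have h1 : (((cs.take n).reverse).takeWhile PySem.Chars.isdigit).reverse.take (sfx + (1 + pfx))
      = (((cs.take n).reverse).takeWhile PySem.Chars.isdigit).reverse :=
    List.take_of_length_le (by rw [htlen]; omega)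
  rw [h1, htlen, Nat.add_sub_cancel_left]
  have h2 : (cs.drop n).take (1 + pfx) = (cs.drop n).takeWhile PySem.Chars.isdigit := by
    have hlen2 : ((cs.drop n).takeWhile PySem.Chars.isdigit).length = 1 + pfx := by
      rw [pvRun_drop_cons cs n hn hd]; simp [hpfx]; omega
    rw [← hlen2, ← pvTakeWhile_eq_take]
  rw [h2]
  rfl

lemma pvDropWhile_eq_drop (p : α → Bool) (l : List α) :
    l.dropWhile p = l.drop (l.takeWhile p).length := by
  conv_lhs => rw [← List.drop_left (l₁ := l.takeWhile p) (l₂ := l.dropWhile p)]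
  rw [List.takeWhile_append_dropWhile]

lemma pvTakeWhile_append_not (p : α → Bool) (A B : List α) (x : α)
    (hx : x ∈ A) (hpx : p x = false) : (A ++ B).takeWhile p = A.takeWhile p := by
  rw [List.takeWhile_append, if_neg]
  intro hlen
  have : A.takeWhile p = A := (List.takeWhile_prefix p).eq_of_length hlen
  have := List.mem_takeWhile_imp (this ▸ hx)
  simp [hpx] at this

lemma pvTakeWhile_append_singleton_not (p : α → Bool) (A : List α) (x : α)
    (hpx : p x = false) : (A ++ [x]).takeWhile p = A.takeWhile p := by
  rw [List.takeWhile_append]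
  split
  · rename_i hlen
    have : A.takeWhile p = A := (List.takeWhile_prefix p).eq_of_length hlen
    simp [hpx, this]
  · rfl

lemma pvShiftTW (cs : List Char) (k n : Nat) (hkn : k < n) (hn : n ≤ cs.length)
    (hknd : PySem.Chars.isdigit (cs[k]'(by omega)) = false) :
    (cs.take n).reverse.takeWhile PySem.Chars.isdigit
      = ((cs.drop k).take (n - k)).reverse.takeWhile PySem.Chars.isdigit := by
  have h1 : cs.take n = cs.take k ++ (cs.drop k).take (n - k) := by
    conv_lhs => rw [← List.take_append_drop k (cs.take n)]
    rw [List.take_take, Nat.min_eq_left (by omega), List.drop_take]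
  rw [h1, List.reverse_append]
  refine pvTakeWhile_append_not _ _ _ (cs[k]'(by omega)) ?_ hknd
  rw [List.mem_reverse]
  have h0 : cs[k]'(by omega) = ((cs.drop k).take (n - k))[0]'(by simp; omega) := by
    simp [List.getElem_take, List.getElem_drop]
  rw [h0]
  exact List.getElem_mem _

lemma pvAll_take_digit (cs : List Char) (n : Nat) (hn : n ≤ cs.length)
    (hall : ∀ a ∈ cs.take n, PySem.Chars.isdigit a = true) :
    pvSfx cs n = n ∧ pvRun cs n = cs.takeWhile PySem.Chars.isdigit := by
  have htw : (cs.take n).reverse.takeWhile PySem.Chars.isdigit = (cs.take n).reverse :=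
    List.takeWhile_eq_self_iff.mpr (by intro a ha; exact hall a (List.mem_reverse.mp ha))
  constructor
  · simp [pvSfx, htw, List.length_take_of_le hn]
  · have htw2 : (cs.take n).takeWhile PySem.Chars.isdigit = cs.take n :=
      List.takeWhile_eq_self_iff.mpr hall
    have hsplit : cs.takeWhile PySem.Chars.isdigit
        = cs.take n ++ (cs.drop n).takeWhile PySem.Chars.isdigit := by
      conv_lhs => rw [← List.take_append_drop n cs]
      rw [List.takeWhile_append, if_pos (by rw [htw2])]
    rw [pvRun, htw, List.reverse_reverse, hsplit]

lemma pvShift_sfx_run (cs : List Char) (k n : Nat) (hkn : k < n) (hn : n < cs.length)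
    (hknd : PySem.Chars.isdigit (cs[k]'(by omega)) = false) :
    pvSfx cs n = pvSfx (cs.drop k) (n - k) ∧ pvRun cs n = pvRun (cs.drop k) (n - k) := by
  have htw := pvShiftTW cs k n hkn (le_of_lt hn) hknd
  refine ⟨by simp [pvSfx, htw], ?_⟩
  rw [pvRun, pvRun, htw, List.drop_drop]
  congr 3
  omega

lemma pvFind_runs (cs : List Char) (i : Nat) :
    ∀ (n : Nat) (L : Int) (hn : n < cs.length), L = ((i + n : Nat) : Int) →
      PySem.Chars.isdigit (cs[n]'hn) = true →
      (pvDigitRuns cs i).find?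
          (fun sr => decide ((sr.1 : Int) ≤ L ∧ L < (sr.1 : Int) + (sr.2.length : Int)))
        = some (i + (n - pvSfx cs n), pvRun cs n) := by
  induction cs, i using pvDigitRuns.induct with
  | case1 i => intro n L hn; simp at hn
  | case2 c rest i hc run ih =>
    intro n L hn hL hd
    rw [pvDigitRuns, if_pos hc]
    set cs := c :: rest with hcs
    set k := (cs.takeWhile PySem.Chars.isdigit).length with hk
    by_cases hnk : n < k
    · -- the position lies in the first run
      have hkle : k ≤ cs.length := by
        have := (List.takeWhile_prefix (l := cs) PySem.Chars.isdigit).length_le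
        omega
      have hTk : cs.takeWhile PySem.Chars.isdigit = cs.take k := by
        rw [hk]; exact pvTakeWhile_eq_take _ _
      have hall : ∀ a ∈ cs.take n, PySem.Chars.isdigit a = true := by
        intro a ha
        have h1 : cs.take n = (cs.takeWhile PySem.Chars.isdigit).take n := by
          rw [hTk, List.take_take, Nat.min_eq_left (le_of_lt hnk)]
        exact List.mem_takeWhile_imp (List.mem_of_mem_take (h1 ▸ ha))
      obtain ⟨hsfx, hrun⟩ := pvAll_take_digit cs n (le_of_lt hn) hall
      rw [List.find?_cons_of_pos (by
        simp only [decide_eq_true_eq]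
        constructor
        · omega
        · rw [hL]; push_cast; omega)]
      rw [hsfx, hrun, Nat.sub_self, Nat.add_zero]
    · -- the position lies beyond the first run: recurse
      have hdrop : cs.dropWhile PySem.Chars.isdigit = cs.drop k := by
        rw [pvDropWhile_eq_drop, ← hk]
      have hklen : k < cs.length := by omega
      have hne : cs.dropWhile PySem.Chars.isdigit ≠ [] := by
        rw [hdrop]
        intro hnil
        have := congrArg List.length hnil
        simp at this
        omega
      have hknd : PySem.Chars.isdigit (cs[k]'hklen) = false := by
        have hhead := List.head_dropWhile_not PySem.Chars.isdigit hne
        rw [List.head_eq_getElem] at hhead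
        simp only [hdrop, List.getElem_drop, Nat.add_zero] at hhead
        exact hhead
      have hkn : k < n := by
        rcases Nat.lt_or_ge k n with h | h
        · exact h
        · have hkeq : k = n := by omega
          simp only [hkeq] at hknd
          rw [hd] at hknd
          exact absurd hknd (by simp)
      rw [List.find?_cons_of_neg (by
        simp only [decide_eq_true_eq]
        rw [hL]
        push_cast
        omega)]
      have hn' : n - k < (cs.dropWhile PySem.Chars.isdigit).length := by
        rw [hdrop]
        simp
        omega
      have hd' : PySem.Chars.isdigit ((cs.dropWhile PySem.Chars.isdigit)[n - k]'hn') = true := by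
        have h2 : ((cs.dropWhile PySem.Chars.isdigit)[n - k]'hn') = cs[n]'hn := by
          simp only [hdrop, List.getElem_drop]
          congr 1
          omega
        rw [h2, hd]
      rw [ih (n - k) L hn' (by rw [hL]; push_cast; omega) hd']
      obtain ⟨hsfx, hrun⟩ := pvShift_sfx_run cs k n hkn hn hknd
      rw [← hdrop] at hsfx hrun
      have hs : pvSfx cs n ≤ n - k := by
        rw [hsfx]
        exact pvSfx_le _ _ (le_of_lt hn')
      rw [← hsfx, ← hrun]
      have harith : i + k + (n - k - pvSfx cs n) = i + (n - pvSfx cs n) := by omega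
      rw [harith]
  | case3 c rest i hc ih =>
    intro n L hn hL hd
    rw [pvDigitRuns, if_neg hc]
    obtain ⟨m, rfl⟩ : ∃ m, n = m + 1 := by
      rcases n with _ | m
      · exact absurd hd (by simpa using hc)
      · exact ⟨m, rfl⟩
    have hm : m < rest.length := by simpa using hn
    have hshift : (c :: rest).take (m+1) = c :: rest.take m := List.take_succ_cons
    have hsfx : pvSfx (c :: rest) (m+1) = pvSfx rest m := by
      unfold pvSfx
      rw [hshift]
      simp only [List.reverse_cons]
      rw [pvTakeWhile_append_singleton_not _ _ _ (by simpa using hc)]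
    have hrun : pvRun (c :: rest) (m+1) = pvRun rest m := by
      unfold pvRun
      rw [hshift]
      simp only [List.reverse_cons]
      rw [pvTakeWhile_append_singleton_not _ _ _ (by simpa using hc), List.drop_succ_cons]
    rw [ih m L hm (by rw [hL]; push_cast; omega) (by simpa using hd)]
    rw [hsfx, hrun]
    have hs := pvSfx_le rest m (le_of_lt hm)
    have harith : i + 1 + (m - pvSfx rest m) = i + (m + 1 - pvSfx rest m) := by omega
    rw [harith]

-- ===== VERDICT (by name: the statement is the Claim_ definition above) =====
theorem extract_int_at_location_spec : Claim_equal_extract_int_at_location := by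
  unfold Claim_equal_extract_int_at_location
  intro s location _ hpre
  obtain ⟨h0, hlen, hdig⟩ := hpre
  unfold Spec_extract_int_at_location
  obtain ⟨n, rfl⟩ : ∃ n : Nat, location = (n : Int) :=
    ⟨location.toNat, (Int.toNat_of_nonneg h0).symm⟩
  set cs := s.toList with hcs
  have hn : n < cs.length := by exact_mod_cast hlen
  have hd : PySem.Chars.isdigit (cs[n]'hn) = true := by
    rwa [Int.toNat_natCast, List.getD_eq_getElem cs ' ' hn] at hdig
  have hget : PySem.List.pyGet? cs ((n : Nat) : Int) = some (cs[n]'hn) := by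
    rw [PySem.List.pyGet?_natCast]
    simp [hn]
  -- reduce the A side
  rw [extract_int_at_location]
  simp only [← hcs, hget, hd, not_true_eq_false, if_neg, not_false_iff]
  rw [pvLeftScan_eq cs n (le_of_lt hn)]
  have hc1 : ((n : Int) + 1) = (((n + 1 : Nat)) : Int) := by push_cast; ring
  rw [hc1, pvRightScan_eq cs (n + 1)]
  -- reduce the B side
  rw [extract_int_at_location_alt]
  simp only [← hcs]
  rw [if_pos ⟨by positivity, by exact_mod_cast hlen, by rw [hget]; simpa using hd⟩]
  rw [pvFind_runs cs 0 n ((n : Nat) : Int) hn (by simp) hd]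
  -- both sides are the int of the same digit run
  have hcast : (n : Int) - (pvSfx cs n : Int) - 1 + 1 = (n : Int) - (pvSfx cs n : Int) := by ring
  have hcast2 : ((n + 1 : Nat) : Int) + (((cs.drop (n+1)).takeWhile PySem.Chars.isdigit).length : Int) - 1 + 1
      = (n : Int) + 1 + (((cs.drop (n+1)).takeWhile PySem.Chars.isdigit).length : Int) := by push_cast; ring
  rw [hcast, hcast2, pvA_slice_eq_run cs n hn hd]
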